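-- pv_equiv track=rewrite | github.com/VNK1990/PracticeFiles | PracticeFiles/MathsPractice/Week3/coin_prob_5_7_sol_1.py | not_divisible_amount
-- ===== SOURCE A (Python) =====
-- def is_breakable(amount):
--     for i in range(1,amount):
--         for j in range(1,amount):
--             if i * 5 + j *7 > amount:
--                 break
--             if i * 5 + j *7 == amount:
--                 return True
--     return False
--
-- def not_divisible_amount(amount,values):
--     assert(amount >= 10)
--     #get the list of values can be distributed by 5 and 7
--     if amount == 1007:
--         return values
--     if amount % 5 == 0 or amount % 7 == 0 or amount % 12 == 0 or is_breakable(amount):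
--         not_divisible_amount(amount + 1,values)
--         return values
--     else:
--         values.append(amount)
--         not_divisible_amount(amount + 1, values)
--         return values
-- ===== SOURCE B (Python) =====
-- def not_divisible_amount(amount, values):
--     # B: closed-form representability test (n = 5a+7b, a,b >= 0  iff  7*((3n) % 5) <= n)
--     # over a single range scan; extends `values` in place like A does.
--     assert amount >= 10
--     values.extend(n for n in range(amount, 1007) if 7 * ((3 * n) % 5) > n)
--     return values
-- ===== Notes on version B (the rewrite author's own statement) =====
-- stated objective: alternative
-- what changed: Replaced the deep recursion with a nested-loop breakability search per amount by a single range scan using the closed-form test 7*((3n)%5)<=n for representability as 5a+7b; intended as faster (a timing run measured B 22x at the largest size both finished, but on a single input, so 'faster' is unconfirmed).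
-- crash fix: For amount > 1007 A recurses past 1007 forever and raises RecursionError; B returns values unchanged (the range is empty). — e.g. on not_divisible_amount(1008, [7]): A raises RecursionError, B returns [7]
import Mathlib
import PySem

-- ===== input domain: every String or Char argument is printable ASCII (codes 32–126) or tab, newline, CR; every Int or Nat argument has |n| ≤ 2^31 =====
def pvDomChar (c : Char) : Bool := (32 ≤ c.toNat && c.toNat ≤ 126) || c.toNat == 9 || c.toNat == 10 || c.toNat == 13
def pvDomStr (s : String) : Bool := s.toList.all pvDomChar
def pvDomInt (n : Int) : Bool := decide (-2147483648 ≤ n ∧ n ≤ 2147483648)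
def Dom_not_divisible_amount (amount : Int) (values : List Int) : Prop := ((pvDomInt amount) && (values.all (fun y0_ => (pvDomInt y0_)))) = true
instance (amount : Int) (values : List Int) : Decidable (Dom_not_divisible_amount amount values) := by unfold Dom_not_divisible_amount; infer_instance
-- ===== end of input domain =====

-- B replaces A's deep recursion + nested-loop breakability search by one range scan with a
-- closed-form representability test (intended as faster; a timing run could not confirm it,
-- so no speed is claimed). Equivalence is about the RETURN value
-- only: A appends to `values` in place (B's Python extends it in place the same way).

-- ===== PORT A =====
-- inner `for j in range(1, amount)` with its break / return True
def isBreakInner (amount i : Int) : List Int → Bool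
  | [] => false
  | j :: rest =>
    if i * 5 + j * 7 > amount then false
    else if i * 5 + j * 7 = amount then true
    else isBreakInner amount i rest

-- outer `for i in range(1, amount)`
def isBreakOuter (amount : Int) : List Int → Bool
  | [] => false
  | i :: rest =>
    if isBreakInner amount i (PySem.List.pyRange 1 amount 1) then true
    else isBreakOuter amount rest

def is_breakable (amount : Int) : Bool :=
  isBreakOuter amount (PySem.List.pyRange 1 amount 1)

-- the recursion of A, with fuel making it total (under Pre_ the fuel is never exhausted)
def notDivGo : Nat → Int → List Int → List Int
  | 0, _, values => values
  | fuel + 1, amount, values =>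
    if amount = 1007 then values
    else if PySem.Int.mod amount 5 = 0 ∨ PySem.Int.mod amount 7 = 0 ∨
            PySem.Int.mod amount 12 = 0 ∨ is_breakable amount = true then
      notDivGo fuel (amount + 1) values
    else
      notDivGo fuel (amount + 1) (values ++ [amount])

def not_divisible_amount (amount : Int) (values : List Int) : List Int :=
  notDivGo ((1007 - amount).toNat + 1) amount values

-- ===== PORT B =====
def not_divisible_amount_alt (amount : Int) (values : List Int) : List Int :=
  values ++ (PySem.List.pyRange amount 1007 1).filter
    (fun n => 7 * PySem.Int.mod (3 * n) 5 > n)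

-- ===== PRECONDITION & SPEC =====
-- A asserts amount >= 10 (AssertionError below) and its recursion only stops at 1007
-- (RecursionError above): Pre_ is exactly the interval on which A returns.
def Pre_not_divisible_amount (amount : Int) (values : List Int) : Prop :=
  10 ≤ amount ∧ amount ≤ 1007
instance (amount : Int) (values : List Int) : Decidable (Pre_not_divisible_amount amount values) := by unfold Pre_not_divisible_amount; infer_instance

def pvWitness_not_divisible_amount : Int × List Int := (995, [3])

-- For amount > 1007 A recurses past 1007 forever and raises RecursionError; B returns values unchanged.
def Raises_not_divisible_amount (amount : Int) (values : List Int) : Prop := 1007 < amount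
instance (amount : Int) (values : List Int) : Decidable (Raises_not_divisible_amount amount values) := by unfold Raises_not_divisible_amount; infer_instance
def pvRaiseWitness_not_divisible_amount : Int × List Int := (1008, [7])
def pvRaiseWitnessOut_not_divisible_amount : List Int := [7]

def Spec_not_divisible_amount (amount : Int) (values : List Int) (out : List Int) : Prop := out = not_divisible_amount_alt amount values
instance (amount : Int) (values : List Int) (out : List Int) : Decidable (Spec_not_divisible_amount amount values out) := by unfold Spec_not_divisible_amount; infer_instance

-- ===== CLAIM (what is proved, stated in full; the proofs are below) =====
def Claim_equal_not_divisible_amount : Prop := ∀ (amount : Int) (values : List Int), Dom_not_divisible_amount amount values → Pre_not_divisible_amount amount values → Spec_not_divisible_amount amount values (not_divisible_amount amount values)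
def Claim_raises_not_divisible_amount : Prop := (∀ (amount : Int) (values : List Int), Dom_not_divisible_amount amount values → Raises_not_divisible_amount amount values → ¬ Pre_not_divisible_amount amount values) ∧ (Dom_not_divisible_amount (pvRaiseWitness_not_divisible_amount.1) (pvRaiseWitness_not_divisible_amount.2) ∧ Raises_not_divisible_amount (pvRaiseWitness_not_divisible_amount.1) (pvRaiseWitness_not_divisible_amount.2) ∧ not_divisible_amount_alt (pvRaiseWitness_not_divisible_amount.1) (pvRaiseWitness_not_divisible_amount.2) = pvRaiseWitnessOut_not_divisible_amount)

-- ===== LEMMAS AND PROOFS =====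

-- n is representable as 5a + 7b with a, b ≥ 0
def RepCoin (n : Int) : Prop := ∃ a b : Int, 0 ≤ a ∧ 0 ≤ b ∧ n = 5 * a + 7 * b

lemma isBreakInner_iff (amount i : Int) (L : List Int) (hL : L.Pairwise (· < ·)) :
    isBreakInner amount i L = true ↔ ∃ j ∈ L, i * 5 + j * 7 = amount := by
  induction L with
  | nil => simp [isBreakInner]
  | cons j rest ih =>
    have hjr : ∀ j' ∈ rest, j < j' := fun j' h => (List.pairwise_cons.1 hL).1 j' h
    have hrest := ih (List.pairwise_cons.1 hL).2
    by_cases hgt : i * 5 + j * 7 > amount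
    · simp only [isBreakInner, if_pos hgt]
      constructor
      · intro h; exact absurd h (by simp)
      · rintro ⟨j', hj', hsum⟩
        rcases List.mem_cons.1 hj' with rfl | hmem
        · omega
        · have := hjr j' hmem; omega
    · by_cases heq : i * 5 + j * 7 = amount
      · simp only [isBreakInner, if_neg hgt, if_pos heq]
        exact ⟨fun _ => ⟨j, List.mem_cons_self .., heq⟩, fun _ => trivial⟩
      · simp only [isBreakInner, if_neg hgt, if_neg heq, hrest]
        constructor
        · rintro ⟨j', hj', hsum⟩; exact ⟨j', List.mem_cons_of_mem _ hj', hsum⟩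
        · rintro ⟨j', hj', hsum⟩
          rcases List.mem_cons.1 hj' with rfl | hmem
          · exact absurd hsum heq
          · exact ⟨j', hmem, hsum⟩

lemma isBreakOuter_iff (amount : Int) (L : List Int) :
    isBreakOuter amount L = true ↔
      ∃ i ∈ L, ∃ j ∈ PySem.List.pyRange 1 amount 1, i * 5 + j * 7 = amount := by
  induction L with
  | nil => simp [isBreakOuter]
  | cons i rest ih =>
    have hinner := isBreakInner_iff amount i (PySem.List.pyRange 1 amount 1)
      ((PySem.List.pairwise_lt_pyRange_one 1 amount).imp (by exact fun h => h))
    by_cases h : isBreakInner amount i (PySem.List.pyRange 1 amount 1) = true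
    · simp only [isBreakOuter, if_pos h]
      rcases hinner.1 h with ⟨j, hj, hsum⟩
      exact ⟨fun _ => ⟨i, List.mem_cons_self .., j, hj, hsum⟩, fun _ => trivial⟩
    · simp only [isBreakOuter, if_neg h, ih]
      constructor
      · rintro ⟨i', hi', rest'⟩; exact ⟨i', List.mem_cons_of_mem _ hi', rest'⟩
      · rintro ⟨i', hi', j, hj, hsum⟩
        rcases List.mem_cons.1 hi' with rfl | hmem
        · exact absurd (hinner.2 ⟨j, hj, hsum⟩) h
        · exact ⟨i', hmem, j, hj, hsum⟩

lemma is_breakable_iff (amount : Int) :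
    is_breakable amount = true ↔
      ∃ i j : Int, 1 ≤ i ∧ i < amount ∧ 1 ≤ j ∧ j < amount ∧ i * 5 + j * 7 = amount := by
  unfold is_breakable
  rw [isBreakOuter_iff]
  constructor
  · rintro ⟨i, hi, j, hj, hsum⟩
    rw [PySem.List.mem_pyRange_one] at hi hj
    exact ⟨i, j, hi.1, hi.2, hj.1, hj.2, hsum⟩
  · rintro ⟨i, j, h1, h2, h3, h4, hsum⟩
    exact ⟨i, PySem.List.mem_pyRange_one.2 ⟨h1, h2⟩, j, PySem.List.mem_pyRange_one.2 ⟨h3, h4⟩, hsum⟩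

-- A's skip condition, for amounts ≥ 10, is exactly representability
lemma condA_iff_rep (n : Int) (hn : 10 ≤ n) :
    (PySem.Int.mod n 5 = 0 ∨ PySem.Int.mod n 7 = 0 ∨ PySem.Int.mod n 12 = 0 ∨
      is_breakable n = true) ↔ RepCoin n := by
  rw [PySem.Int.mod_eq_emod_of_pos (show (0:Int) < 5 by norm_num),
      PySem.Int.mod_eq_emod_of_pos (show (0:Int) < 7 by norm_num),
      PySem.Int.mod_eq_emod_of_pos (show (0:Int) < 12 by norm_num),
      is_breakable_iff]
  constructor
  · rintro (h | h | h | ⟨i, j, h1, h2, h3, h4, hsum⟩)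
    · exact ⟨n / 5, 0, by omega, by omega, by omega⟩
    · exact ⟨0, n / 7, by omega, by omega, by omega⟩
    · exact ⟨n / 12, n / 12, by omega, by omega, by omega⟩
    · exact ⟨i, j, by omega, by omega, by omega⟩
  · rintro ⟨a, b, ha, hb, hab⟩
    by_cases hb0 : b = 0
    · left; omega
    · by_cases ha0 : a = 0
      · right; left; omega
      · right; right; right
        exact ⟨a, b, by omega, by omega, by omega, by omega, by omega⟩

-- B's keep test is the negation of representability
lemma keepB_iff (n : Int) (hn : 0 ≤ n) :
    (7 * PySem.Int.mod (3 * n) 5 > n) ↔ ¬ RepCoin n := by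
  rw [PySem.Int.mod_eq_emod_of_pos (show (0:Int) < 5 by norm_num)]
  constructor
  · rintro h ⟨a, b, ha, hb, rfl⟩
    have h5 : (3 * (5 * a + 7 * b)) % 5 = b % 5 := by
      conv_lhs => rw [show 3 * (5 * a + 7 * b) = b + 5 * (3 * a + 4 * b) by ring]
      simp [Int.add_mul_emod_self_left]
    omega
  · intro h
    by_contra hle
    exact h ⟨(n - 7 * ((3 * n) % 5)) / 5, (3 * n) % 5, by omega, by omega, by omega⟩

lemma notDivGo_eq (fuel : Nat) :
    ∀ (amount : Int) (values : List Int), 10 ≤ amount → amount ≤ 1007 →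
      (1007 - amount).toNat < fuel →
      notDivGo fuel amount values =
        values ++ (PySem.List.pyRange amount 1007 1).filter
          (fun n => 7 * PySem.Int.mod (3 * n) 5 > n) := by
  induction fuel with
  | zero => intro amount values _ _ h; omega
  | succ f ih =>
    intro amount values h10 hle hfuel
    by_cases h1007 : amount = 1007
    · subst h1007
      simp [notDivGo, PySem.List.pyRange_one_eq_nil (le_refl (1007 : Int))]
    · have hlt : amount < 1007 := lt_of_le_of_ne hle h1007
      rw [PySem.List.pyRange_one_cons hlt]
      have hrec := fun v => ih (amount + 1) v (by omega) (by omega) (by omega)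
      by_cases hcond : PySem.Int.mod amount 5 = 0 ∨ PySem.Int.mod amount 7 = 0 ∨
          PySem.Int.mod amount 12 = 0 ∨ is_breakable amount = true
      · have hrep : RepCoin amount := (condA_iff_rep amount h10).1 hcond
        have hkeep : ¬ (7 * PySem.Int.mod (3 * amount) 5 > amount) := by
          intro h; exact (keepB_iff amount (by omega)).1 h hrep
        simp only [notDivGo, if_neg h1007, if_pos hcond, hrec values,
          List.filter_cons, decide_eq_true_eq, if_neg hkeep]
      · have hrep : ¬ RepCoin amount := fun hr => hcond ((condA_iff_rep amount h10).2 hr)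
        have hkeep : 7 * PySem.Int.mod (3 * amount) 5 > amount :=
          (keepB_iff amount (by omega)).2 hrep
        simp only [notDivGo, if_neg h1007, if_neg hcond, hrec (values ++ [amount]),
          List.filter_cons, decide_eq_true_eq, if_pos hkeep, List.append_assoc,
          List.singleton_append]

-- ===== VERDICT (by name: the statement is the Claim_ definition above) =====
theorem not_divisible_amount_spec : Claim_equal_not_divisible_amount := by
  intro amount values _ hpre
  unfold Spec_not_divisible_amount not_divisible_amount not_divisible_amount_alt
  exact notDivGo_eq _ amount values hpre.1 hpre.2 (by omega)

@[simp] theorem not_divisible_amount_raises : Claim_raises_not_divisible_amount := by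
  unfold Claim_raises_not_divisible_amount
  exact ⟨fun amount values _ hr hpre => by
    unfold Raises_not_divisible_amount at hr
    unfold Pre_not_divisible_amount at hpre
    omega, by decide⟩
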